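-- pv_equiv track=rewrite | github.com/fvckinfa/adventofcode2025 | code/2025/day03.py | best_two_digits
-- ===== SOURCE A (Python) =====
-- def best_two_digits(s: str) -> int:
--     # Choose i<j to maximize 10*s[i] + s[j]
--     digits = [ord(c) - 48 for c in s.strip()]
--     n = len(digits)
--     if n < 2:
--         return 0
--
--     # suffix max digit
--     sufmax = [0] * (n + 1)
--     sufmax[n] = -1
--     for i in range(n - 1, -1, -1):
--         sufmax[i] = max(sufmax[i + 1], digits[i])
--
--     best = -1
--     for tens in range(9, 0, -1):
--         # earliest position of 'tens' that has a later digit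
--         for i in range(n - 1):
--             if digits[i] == tens:
--                 ones = sufmax[i + 1]
--                 if ones >= 0:
--                     val = 10 * tens + ones
--                     if val > best:
--                         best = val
--                 break
--         if best >= 0:
--             break
--     return best if best >= 0 else 0
-- ===== SOURCE B (Python) =====
-- def best_two_digits(s: str) -> int:
--     # Choose i<j to maximize 10*s[i] + s[j]
--     digits = [ord(c) - 48 for c in s.strip()]
--     n = len(digits)
--     if n < 2:
--         return 0
--
--     # One right-to-left pass: for each tens value t seen at some position i < n-1,
--     # ones_at[t] ends up as the max of digits after the EARLIEST such position.
--     ones_at = {}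
--     m = digits[n - 1]
--     for i in range(n - 2, -1, -1):
--         if 1 <= digits[i] <= 9:
--             ones_at[digits[i]] = m
--         if digits[i] > m:
--             m = digits[i]
--
--     for t in range(9, 0, -1):
--         if t in ones_at and ones_at[t] >= 0:
--             return 10 * t + ones_at[t]
--     return 0
-- ===== Notes on version B (the rewrite author's own statement) =====
-- stated objective: faster
-- what changed: A's suffix-max table plus nested scans (for each tens=9..1, rescan positions) is replaced by a single right-to-left pass recording, per tens digit 1..9, the max digit after its earliest position, then one lookup loop over 9..1.
import Mathlib
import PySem

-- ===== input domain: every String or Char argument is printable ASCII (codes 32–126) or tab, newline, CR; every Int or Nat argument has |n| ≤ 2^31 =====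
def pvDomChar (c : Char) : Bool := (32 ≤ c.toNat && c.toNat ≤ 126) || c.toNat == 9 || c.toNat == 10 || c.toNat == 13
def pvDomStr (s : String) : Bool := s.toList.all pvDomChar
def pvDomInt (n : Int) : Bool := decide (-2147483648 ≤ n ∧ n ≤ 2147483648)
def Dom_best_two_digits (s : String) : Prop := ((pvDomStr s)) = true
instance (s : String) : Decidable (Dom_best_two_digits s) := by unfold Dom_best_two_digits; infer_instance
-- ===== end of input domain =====

-- B replaces A's suffix-max table plus the nested tens/position scans with a single
-- right-to-left pass that records, per tens digit 1..9, the max digit after its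
-- earliest position — one pass instead of up to ten (objective: faster, constant factor).

-- shared by both ports: the identical first line `[ord(c) - 48 for c in s.strip()]`
def pvDigits (s : String) : List Int :=
  (PySem.Str.strip s).toList.map (fun c => (c.toNat : Int) - 48)

-- ===== PORT A =====
-- the backward loop `for i in range(n-1,-1,-1): sufmax[i] = max(sufmax[i+1], digits[i])`
-- with sufmax[n] = -1, as the obvious structural recursion building the table back-to-front
def pvBuildSuf : List Int → List Int
  | [] => [-1]
  | x :: xs =>
    let r := pvBuildSuf xs
    (max (r.headD (-1)) x) :: r

-- inner loop `for i in range(n-1): if digits[i] == tens: …; break` over the pairs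
-- (digits[i], sufmax[i+1]) for i < n-1
def pvInnerA (tens best : Int) : List (Int × Int) → Int
  | [] => best
  | (di, si) :: rest =>
    if di = tens then
      (if si ≥ 0 then (if 10 * tens + si > best then 10 * tens + si else best) else best)
    else pvInnerA tens best rest

-- outer loop `for tens in range(9, 0, -1): …; if best >= 0: break`
def pvOuterA (pairs : List (Int × Int)) : List Int → Int → Int
  | [], best => best
  | t :: ts, best =>
    let b := pvInnerA t best pairs
    if b ≥ 0 then b else pvOuterA pairs ts b

def best_two_digits (s : String) : Int :=
  let digits := pvDigits s
  let n := digits.length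
  if n < 2 then 0
  else
    let suf := pvBuildSuf digits
    let pairs := digits.dropLast.zip suf.tail
    let best := pvOuterA pairs (PySem.List.pyRange 9 0 (-1)) (-1)
    if best ≥ 0 then best else 0

-- ===== PORT B =====
-- one step of the backward pass:
-- `if 1 <= digits[i] <= 9: ones_at[digits[i]] = m` then `if digits[i] > m: m = digits[i]`
def pvStepB (st : PySem.Dict Int Int × Int) (x : Int) : PySem.Dict Int Int × Int :=
  ((if 1 ≤ x ∧ x ≤ 9 then st.1.insert x st.2 else st.1), (if x > st.2 then x else st.2))

-- final loop `for t in range(9, 0, -1): if t in ones_at and ones_at[t] >= 0: return …`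
def pvPickB (d : PySem.Dict Int Int) : List Int → Int
  | [] => 0
  | t :: ts =>
    match d.get? t with
    | some v => if v ≥ 0 then 10 * t + v else pvPickB d ts
    | none => pvPickB d ts

def best_two_digits_alt (s : String) : Int :=
  let digits := pvDigits s
  let n := digits.length
  if n < 2 then 0
  else
    -- `for i in range(n-2, -1, -1)` visits digits[0..n-2] right to left
    let st := (digits.dropLast).reverse.foldl pvStepB (PySem.Dict.empty, digits.getLastD 0)
    pvPickB st.1 (PySem.List.pyRange 9 0 (-1))

-- ===== PRECONDITION & SPEC =====
def Spec_best_two_digits (s : String) (out : Int) : Prop := out = best_two_digits_alt s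
instance (s : String) (out : Int) : Decidable (Spec_best_two_digits s out) := by unfold Spec_best_two_digits; infer_instance

-- ===== CLAIM (what is proved, stated in full; the proofs are below) =====
def Claim_equal_best_two_digits : Prop := ∀ (s : String), Dom_best_two_digits s → Spec_best_two_digits s (best_two_digits s)

-- ===== LEMMAS AND PROOFS =====

-- the value both programs associate to a tens digit t: the max of everything after the
-- EARLIEST occurrence of t in L (none if t does not occur in L), lastv being the final digit
def pvG (t : Int) : List Int → Int → Option Int
  | [], _ => none
  | x :: xs, lastv => if x = t then some (xs.foldr max lastv) else pvG t xs lastv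

-- A's pairs (digits[i], sufmax[i+1]); sufmax carries the -1 sentinel
def pvPairsOf : List Int → Int → List (Int × Int)
  | [], _ => []
  | x :: xs, lastv => (x, max (xs.foldr max lastv) (-1)) :: pvPairsOf xs lastv

theorem pvFoldrMaxInit (xs : List Int) (a b : Int) :
    xs.foldr max (max a b) = max (xs.foldr max a) b := by
  induction xs with
  | nil => rfl
  | cons x xs ih => simp only [List.foldr_cons, ih, max_assoc]

theorem pvBuildSuf_headD (l : List Int) : (pvBuildSuf l).headD (-1) = l.foldr max (-1) := by
  induction l with
  | nil => rfl
  | cons x xs ih => simp only [pvBuildSuf, List.headD_cons, List.foldr_cons, ih]; omega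

theorem pvBuildSuf_ne_nil (l : List Int) : pvBuildSuf l ≠ [] := by
  cases l <;> simp [pvBuildSuf]

theorem pvPairsA (L : List Int) (lastv : Int) :
    ((L ++ [lastv]).dropLast).zip ((pvBuildSuf (L ++ [lastv])).tail) = pvPairsOf L lastv := by
  induction L with
  | nil => simp [pvBuildSuf, pvPairsOf]
  | cons x L ih =>
    have hM : L ++ [lastv] ≠ [] := by simp
    have hd : pvBuildSuf (L ++ [lastv])
        = ((L ++ [lastv]).foldr max (-1)) :: (pvBuildSuf (L ++ [lastv])).tail := by
      have := pvBuildSuf_ne_nil (L ++ [lastv])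
      cases h : pvBuildSuf (L ++ [lastv]) with
      | nil => exact absurd h this
      | cons a r =>
        have : (pvBuildSuf (L ++ [lastv])).headD (-1) = a := by rw [h]; rfl
        rw [pvBuildSuf_headD] at this
        simp [← this]
    have hfold : (L ++ [lastv]).foldr max (-1) = max (L.foldr max lastv) (-1) := by
      rw [List.foldr_append]
      simpa using pvFoldrMaxInit L lastv (-1)
    calc ((x :: (L ++ [lastv])).dropLast).zip ((pvBuildSuf (x :: (L ++ [lastv]))).tail)
        = (x :: (L ++ [lastv]).dropLast).zip (pvBuildSuf (L ++ [lastv])) := by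
          rw [List.dropLast_cons_of_ne_nil hM]; rfl
      _ = (x :: (L ++ [lastv]).dropLast).zip (((L ++ [lastv]).foldr max (-1)) :: (pvBuildSuf (L ++ [lastv])).tail) := by rw [← hd]
      _ = (x, max (L.foldr max lastv) (-1)) :: pvPairsOf L lastv := by
          rw [List.zip_cons_cons, ih, hfold]
      _ = pvPairsOf (x :: L) lastv := rfl

theorem pvInnerA_char (L : List Int) (lastv t best : Int) :
    pvInnerA t best (pvPairsOf L lastv)
      = match pvG t L lastv with
        | none => best
        | some sv => if sv ≥ 0 then (if 10 * t + sv > best then 10 * t + sv else best) else best := by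
  induction L with
  | nil => rfl
  | cons x xs ih =>
    by_cases hx : x = t
    · subst hx
      by_cases hs : xs.foldr max lastv ≥ 0
      · have h1 : max (xs.foldr max lastv) (-1) = xs.foldr max lastv := by omega
        simp [pvPairsOf, pvInnerA, pvG, h1, hs]
      · have h1 : ¬ (max (xs.foldr max lastv) (-1) ≥ 0) := by omega
        simp [pvPairsOf, pvInnerA, pvG, h1, hs]
    · simp only [pvPairsOf, pvInnerA, pvG, if_neg hx, ih]

theorem pvStepB_snd (st : PySem.Dict Int Int × Int) (x : Int) :
    (pvStepB st x).2 = max x st.2 := by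
  simp only [pvStepB]; omega

theorem pvStepB_get? (st : PySem.Dict Int Int × Int) (x t : Int) (h1 : 1 ≤ t) (h2 : t ≤ 9) :
    (pvStepB st x).1.get? t = if x = t then some st.2 else st.1.get? t := by
  by_cases hx : x = t
  · subst hx
    simp [pvStepB, (⟨h1, h2⟩ : 1 ≤ x ∧ x ≤ 9), PySem.Dict.get?_insert_self]
  · rw [if_neg hx]
    by_cases hr : 1 ≤ x ∧ x ≤ 9
    · simp only [pvStepB, if_pos hr]
      exact PySem.Dict.get?_insert_of_ne _ _ (fun h => hx h.symm)
    · simp only [pvStepB, if_neg hr]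

theorem pvSndChar (L : List Int) (lastv : Int) (d0 : PySem.Dict Int Int) :
    (L.foldr (fun x st => pvStepB st x) (d0, lastv)).2 = L.foldr max lastv := by
  induction L with
  | nil => rfl
  | cons x xs ih => rw [List.foldr_cons, List.foldr_cons, pvStepB_snd, ih]

theorem pvDictChar (L : List Int) (lastv : Int) (d0 : PySem.Dict Int Int) (t : Int)
    (ht : 1 ≤ t ∧ t ≤ 9) :
    (L.foldr (fun x st => pvStepB st x) (d0, lastv)).1.get? t
      = match pvG t L lastv with
        | some v => some v
        | none => d0.get? t := by
  induction L with
  | nil => rfl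
  | cons x xs ih =>
    rw [List.foldr_cons, pvStepB_get? _ _ _ ht.1 ht.2]
    by_cases hx : x = t
    · rw [if_pos hx, pvSndChar]
      simp [pvG, hx]
    · rw [if_neg hx, ih]
      simp [pvG, hx]

theorem pvOuterPick (L : List Int) (lastv : Int) (d : PySem.Dict Int Int) (ts : List Int)
    (hts : ∀ t ∈ ts, 1 ≤ t ∧ t ≤ 9)
    (hd : ∀ t, 1 ≤ t → t ≤ 9 → d.get? t = pvG t L lastv) :
    (if pvOuterA (pvPairsOf L lastv) ts (-1) ≥ 0 then pvOuterA (pvPairsOf L lastv) ts (-1) else 0)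
      = pvPickB d ts := by
  induction ts with
  | nil => rfl
  | cons t ts ih =>
    have ht := hts t (by simp)
    have hget := hd t ht.1 ht.2
    simp only [pvOuterA, pvPickB, pvInnerA_char]
    cases hg : pvG t L lastv with
    | none =>
      rw [hget, hg]
      simpa using ih (fun u hu => hts u (by simp [hu]))
    | some v =>
      rw [hget, hg]
      by_cases hv : v ≥ 0
      · have h10 : 10 * t + v > -1 := by omega
        simp only [if_pos hv, if_pos h10]
        split_ifs with hw h2
        · rfl
        · exact absurd (show 10 * t + v ≥ 0 by nlinarith [ht.1, hv]) hw
        · exact absurd (show 10 * t + v ≥ 0 by nlinarith [ht.1, hv]) hw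
      · simp only [if_neg hv]
        simpa using ih (fun u hu => hts u (by simp [hu]))

-- ===== VERDICT (by name: the statement is the Claim_ definition above) =====
theorem best_two_digits_spec : Claim_equal_best_two_digits := by
  intro s _
  unfold Spec_best_two_digits best_two_digits best_two_digits_alt
  by_cases h : (pvDigits s).length < 2
  · simp only [if_pos h]
  · simp only [if_neg h]
    have hne : pvDigits s ≠ [] := by
      intro hnil; rw [hnil] at h; simp at h
    have hdec : (pvDigits s).dropLast ++ [(pvDigits s).getLast hne] = pvDigits s :=
      List.dropLast_append_getLast hne
    set L := (pvDigits s).dropLast with hL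
    set a := (pvDigits s).getLast hne with ha
    rw [← hdec]
    have hdrop : (L ++ [a]).dropLast = L := List.dropLast_concat ..
    have hlastD : (L ++ [a]).getLastD 0 = a := List.getLastD_concat
    have hp := pvPairsA L a
    rw [hdrop] at hp
    rw [hlastD, hp, List.foldl_reverse]
    exact pvOuterPick L a _ _ (by decide)
      (fun t h1 h2 => by
        rw [pvDictChar L a PySem.Dict.empty t ⟨h1, h2⟩]
        cases hg : pvG t L a with
        | none => simp [PySem.Dict.get?_empty]
        | some v => rfl)
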